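-- pv_equiv track=rewrite | github.com/As1i1/Competitive-programming | MOSH/A.py | slowly
-- ===== SOURCE A (Python) =====
-- def check(s1, s2, slow):
--     a = 0
--     if len(s1) > len(s2):
--         a += 2
--     for i in range(len(s2)):
--         if s1[i] != s2[i]:
--             a += slow[int(s1[i])]
--     return a
--
-- def slowly(k):
--     slow = {1: 4, 2: 5, 3: 2, 4: 3, 5: 3, 6: 1, 7: 5, 8: 4, 9: 1, 0: 2}
--     cur = 0
--     ans = 0
--     for i in range(int(k)):
--         cur += 1
--         n_cur, o_cur = str(cur)[::-1], str(cur - 1)[::-1]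
--         ans += check(n_cur, o_cur, slow)
--     return ans
-- ===== SOURCE B (Python) =====
-- def slowly(k):
--     # Odometer: keep the reversed digit list of the counter and pay costs
--     # during the in-place increment -- no per-step str()/reversal/dict work.
--     slow = [2, 4, 5, 2, 3, 3, 1, 5, 4, 1]
--     ds = [0]
--     ans = 0
--     for _ in range(int(k)):
--         i = 0
--         while i < len(ds) and ds[i] == 9:
--             ds[i] = 0
--             ans += 2
--             i += 1
--         if i == len(ds):
--             ds.append(1)
--             ans += 2
--         else:
--             ds[i] += 1
--             ans += slow[ds[i]]
--     return ans
-- ===== Notes on version B (the rewrite author's own statement) =====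
-- stated objective: faster
-- what changed: Instead of re-stringifying cur and cur-1 every step, reversing both and comparing characters through a digit dict, B keeps the counter as a mutable reversed digit list and charges the typing cost directly while performing the odometer increment (amortized O(1) digit work per step).
import Mathlib
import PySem

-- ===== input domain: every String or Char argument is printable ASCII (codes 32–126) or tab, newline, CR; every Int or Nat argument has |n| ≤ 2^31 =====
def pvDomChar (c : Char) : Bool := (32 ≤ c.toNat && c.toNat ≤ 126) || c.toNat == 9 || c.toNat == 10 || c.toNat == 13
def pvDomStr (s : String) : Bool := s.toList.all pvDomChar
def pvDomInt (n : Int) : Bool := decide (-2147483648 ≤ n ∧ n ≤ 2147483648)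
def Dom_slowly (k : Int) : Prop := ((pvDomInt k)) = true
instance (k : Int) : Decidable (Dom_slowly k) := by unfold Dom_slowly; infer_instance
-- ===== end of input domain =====

-- B replaces A's per-step stringify/reverse/compare-through-a-dict with an
-- odometer digit list charged during the increment (objective: faster).

-- ===== PORT A =====
-- the dict literal {1:4, 2:5, ...} of A
def slowDictA : PySem.Dict Int Int :=
  PySem.Dict.ofList [(1,4),(2,5),(3,2),(4,3),(5,3),(6,1),(7,5),(8,4),(9,1),(0,2)]

-- check(s1, s2, slow): slow is always the fixed dict literal above.  s1[i]/s2[i]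
-- are ported with pyGetD (inside slowly, i is in range of both strings since
-- len s1 ≥ len s2); int(s1[i]) is ofChars? on the one-character string (always a
-- digit char here, so the getD defaults never fire) and slow[...] always hits a
-- key 0..9, so the total getD forms are exact on every input slowly produces.
def checkA (s1 s2 : List Char) : Int :=
  let a : Int := if s1.length > s2.length then 2 else 0
  (PySem.List.pyRange 0 (s2.length : Int) 1).foldl
    (fun a i =>
      if PySem.List.pyGetD s1 i ' ' ≠ PySem.List.pyGetD s2 i ' ' then
        a + slowDictA.getD ((PySem.Int.ofChars? [PySem.List.pyGetD s1 i ' ']).getD 0) 0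
      else a) a

-- one body of A's 'for i in range(int(k))' loop; state = (cur, ans);
-- str(x)[::-1] is toChars followed by the [::-1] slice
def slowlyStepA (st : Int × Int) (_i : Int) : Int × Int :=
  let cur := st.1 + 1
  let n_cur := (PySem.List.slice? (PySem.Int.toChars cur) none none (-1)).getD []
  let o_cur := (PySem.List.slice? (PySem.Int.toChars (cur - 1)) none none (-1)).getD []
  (cur, st.2 + checkA n_cur o_cur)

def slowly (k : Int) : Int :=
  ((PySem.List.pyRange 0 k 1).foldl slowlyStepA ((0 : Int), (0 : Int))).2

-- ===== PORT B =====
def slowB : List Int := [2, 4, 5, 2, 3, 3, 1, 5, 4, 1]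

-- B's inner while/if over the digit list ds (least-significant digit first),
-- as the obvious structural recursion: returns (cost charged, updated digits).
def incB : List Int → Int × List Int
  | [] => (2, [1])                                   -- i == len(ds): append 1, ans += 2
  | d :: r =>
    if d == 9 then
      let p := incB r
      (p.1 + 2, 0 :: p.2)                            -- ds[i] = 0, ans += 2, keep walking
    else
      (PySem.List.pyGetD slowB (d + 1) 0, (d + 1) :: r)  -- ds[i] += 1, ans += slow[ds[i]]

def slowly_alt (k : Int) : Int :=
  ((PySem.List.pyRange 0 k 1).foldl
    (fun st _ => let p := incB st.1; (p.2, st.2 + p.1))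
    ([(0 : Int)], (0 : Int))).2

-- ===== PRECONDITION & SPEC =====
def Spec_slowly (k : Int) (out : Int) : Prop := out = slowly_alt k
instance (k : Int) (out : Int) : Decidable (Spec_slowly k out) := by unfold Spec_slowly; infer_instance

-- ===== CLAIM (what is proved, stated in full; the proofs are below) =====
def Claim_equal_slowly : Prop := ∀ (k : Int), Dom_slowly k → Spec_slowly k (slowly k)

-- ===== LEMMAS AND PROOFS =====

-- proof-side model: decimal digits of n, least significant first, with 0 ↦ [0]
def padD (n : Nat) : List Nat := if n = 0 then [0] else Nat.digits 10 n

def incD : List Nat → List Nat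
  | [] => [1]
  | d :: r => if d = 9 then 0 :: incD r else (d + 1) :: r

def slowVal (d : Nat) : Int := slowB.getD d 0

def costD : List Nat → Int
  | [] => 2
  | d :: r => if d = 9 then 2 + costD r else slowVal (d + 1)

-- the per-character weight A's check adds on a mismatch
def wA (c : Char) : Int := slowDictA.getD ((PySem.Int.ofChars? [c]).getD 0) 0

lemma padD_pos {n : Nat} (h : 0 < n) : padD n = Nat.digits 10 n := by
  unfold padD; rw [if_neg (by omega)]

lemma toDigitsCore_small (fu n : Nat) (acc : List Char) (h : n < 10) :
    Nat.toDigitsCore 10 (fu + 1) n acc = ((padD n).map Nat.digitChar).reverse ++ acc := by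
  have hd : n / 10 = 0 := Nat.div_eq_of_lt h
  have hm : n % 10 = n := Nat.mod_eq_of_lt h
  rw [Nat.toDigitsCore.eq_def]
  simp only [hd, hm, reduceIte]
  rcases Nat.eq_zero_or_pos n with h0 | h0
  · subst h0; simp [padD]
  · rw [padD_pos h0, Nat.digits_def' (by norm_num : (1:ℕ) < 10) h0, hd, hm]
    simp

lemma toDigitsCore_eq (f : Nat) : ∀ (n : Nat) (acc : List Char), n < 10 ^ (f + 1) →
    Nat.toDigitsCore 10 (f + 1) n acc = ((padD n).map Nat.digitChar).reverse ++ acc := by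
  induction f with
  | zero =>
    intro n acc h
    exact toDigitsCore_small 0 n acc (by simpa using h)
  | succ f ih =>
    intro n acc h
    by_cases h10 : n < 10
    · exact toDigitsCore_small (f+1) n acc h10
    · have h0 : 0 < n := by omega
      have hd : ¬ n / 10 = 0 := by omega
      have hrec : Nat.toDigitsCore 10 (f + 1 + 1) n acc
          = Nat.toDigitsCore 10 (f + 1) (n / 10) ((n % 10).digitChar :: acc) := by
        rw [Nat.toDigitsCore.eq_def]
        simp [hd]
      have hlt : n / 10 < 10 ^ (f + 1) := by
        apply Nat.div_lt_of_lt_mul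
        rw [pow_succ] at h; omega
      rw [hrec, ih (n / 10) _ hlt]
      rw [padD_pos h0, Nat.digits_def' (by norm_num : (1:ℕ) < 10) h0,
        padD_pos (by omega : 0 < n / 10)]
      simp

lemma toChars_natCast (n : Nat) :
    PySem.Int.toChars (n : Int) = ((padD n).map Nat.digitChar).reverse := by
  have h1 : ¬ ((n : Int) < 0) := by omega
  have h2 : ((n : Int)).toNat = n := by omega
  rw [PySem.Int.toChars, if_neg h1, h2, Nat.toDigits]
  rcases Nat.eq_zero_or_pos n with h0 | h0
  · subst h0; simp [padD, Nat.toDigitsCore]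
  · have : n < 10 ^ (n + 1) :=
      lt_of_lt_of_le (Nat.lt_pow_self (by norm_num))
        (Nat.pow_le_pow_right (by norm_num) (Nat.le_succ n))
    simpa using toDigitsCore_eq n n [] this

lemma incD_padD (n : Nat) : incD (padD n) = padD (n + 1) := by
  induction n using Nat.strong_induction_on with
  | _ n ih =>
    rcases Nat.eq_zero_or_pos n with h0 | h0
    · subst h0; norm_num [padD, incD]
    · rw [padD_pos h0, Nat.digits_def' (by norm_num : (1:ℕ) < 10) h0,
        padD_pos (Nat.succ_pos n), Nat.digits_def' (by norm_num : (1:ℕ) < 10) (Nat.succ_pos n)]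
      by_cases h9 : n % 10 = 9
      · have e1 : (n+1) % 10 = 0 := by omega
        have e2 : (n+1) / 10 = n / 10 + 1 := by omega
        rw [incD, if_pos h9, e1, e2]
        rcases Nat.eq_zero_or_pos (n / 10) with hq | hq
        · rw [hq]
          rw [Nat.digits_def' (by norm_num : (1:ℕ) < 10) (by norm_num : (0:ℕ) < 1)]
          simp [incD]
        · have hpq : Nat.digits 10 (n / 10) = padD (n / 10) := (padD_pos hq).symm
          rw [hpq, ih (n/10) (Nat.div_lt_self h0 (by norm_num)),
            padD_pos (Nat.succ_pos _)]
      · have e1 : (n+1) % 10 = n % 10 + 1 := by omega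
        have e2 : (n+1) / 10 = n / 10 := by omega
        rw [incD, if_neg h9, e1, e2]

lemma padD_lt (n : Nat) : ∀ e ∈ padD n, e < 10 := by
  unfold padD
  split
  · intro e he; simp at he; omega
  · intro e he; exact Nat.digits_lt_base (by norm_num) he

lemma length_le_incD (L : List Nat) : L.length ≤ (incD L).length := by
  induction L with
  | nil => simp [incD]
  | cons d r ih =>
    rw [incD]
    split
    · simp; omega
    · simp

lemma incB_eq (L : List Nat) (h : ∀ e ∈ L, e < 10) :
    incB (L.map (Int.ofNat)) = (costD L, (incD L).map (Int.ofNat)) := by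
  induction L with
  | nil => simp [incB, incD, costD]
  | cons d r ih =>
    rw [List.map_cons, incB]
    by_cases h9 : d = 9
    · subst h9
      rw [if_pos (by decide), ih (fun e he => h e (by simp [he]))]
      simp only [costD, incD, reduceIte, List.map_cons, Prod.mk.injEq]
      exact ⟨by ring, by simp⟩
    · rw [if_neg (by simp only [beq_iff_eq, Int.ofNat_eq_natCast]; omega)]
      simp only [costD, incD, if_neg h9, List.map_cons, slowVal, Int.ofNat_eq_natCast,
        show ((d : Int) + 1) = (((d+1 : Nat)) : Int) by omega]
      rw [PySem.List.pyGetD_natCast]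

lemma wA_digitChar (e : Nat) (h : e < 10) : wA (Nat.digitChar e) = slowVal e := by
  interval_cases e <;> decide

lemma sum_zip_self (xs : List Char) :
    ((xs.zip xs).map (fun p => if p.2 ≠ p.1 then wA p.2 else 0)).sum = 0 := by
  induction xs with
  | nil => simp
  | cons c r ih => simpa using ih

lemma checkA_zip (s1 s2 : List Char) (h : s2.length ≤ s1.length) :
    checkA s1 s2 = (if s1.length > s2.length then (2:Int) else 0) +
      ((s2.zip s1).map (fun p => if p.2 ≠ p.1 then wA p.2 else 0)).sum := by
  unfold checkA
  have hz : (s2.zip s1).length = s2.length := by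
    rw [List.length_zip]; omega
  have step1 : (PySem.List.pyRange 0 (s2.length : Int) 1).foldl
      (fun a i =>
        if PySem.List.pyGetD s1 i ' ' ≠ PySem.List.pyGetD s2 i ' ' then
          a + slowDictA.getD ((PySem.Int.ofChars? [PySem.List.pyGetD s1 i ' ']).getD 0) 0
        else a)
      (if s1.length > s2.length then (2:Int) else 0)
      = ((s2.zip s1).foldl
          (fun a p => a + (if p.2 ≠ p.1 then wA p.2 else 0))
          (if s1.length > s2.length then (2:Int) else 0)) := by
    rw [show ((s2.length : Int)) = PySem.List.len (s2.zip s1) by simp [hz]]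
    rw [← PySem.List.foldl_pyRange_zero_pyGetD (s2.zip s1) (' ', ' ')
      (fun a p => a + (if p.2 ≠ p.1 then wA p.2 else 0))]
    apply PySem.List.foldl_congr_mem
    intro acc i hi
    rcases (PySem.List.mem_pyRange_one).mp hi with ⟨hi0, hi1⟩
    simp only [PySem.List.len_eq] at hi1
    have hiz : i < ((s2.zip s1).length : Int) := hi1
    have his2 : i < (s2.length : Int) := by omega
    have his1 : i < (s1.length : Int) := by omega
    rw [PySem.List.pyGetD_eq_getElem _ _ hi0 hiz,
      PySem.List.pyGetD_eq_getElem _ _ hi0 his2,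
      PySem.List.pyGetD_eq_getElem _ _ hi0 his1,
      List.getElem_zip]
    unfold wA
    split
    · rfl
    · simp
  rw [step1, PySem.List.foldl_add]

lemma dc_ne {a b : Nat} (ha : a < 10) (hb : b < 10) (hne : a ≠ b) :
    Nat.digitChar a ≠ Nat.digitChar b := by
  revert hne
  interval_cases a <;> interval_cases b <;> decide

lemma aux_cost (L : List Nat) (h : ∀ e ∈ L, e < 10) :
    (if (incD L).length > L.length then (2:Int) else 0) +
      (((L.map Nat.digitChar).zip ((incD L).map Nat.digitChar)).map
        (fun p => if p.2 ≠ p.1 then wA p.2 else 0)).sum = costD L := by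
  induction L with
  | nil => simp [incD, costD]
  | cons d r ih =>
    have hd : d < 10 := h d (by simp)
    by_cases h9 : d = 9
    · subst h9
      rw [incD, if_pos rfl, costD, if_pos rfl, ← ih (fun e he => h e (by simp [he]))]
      simp only [List.map_cons, List.zip_cons_cons, List.sum_cons, List.length_cons]
      rw [show (if Nat.digitChar 0 ≠ Nat.digitChar 9 then wA (Nat.digitChar 0) else 0) = 2 by decide]
      simp only [gt_iff_lt, Nat.add_lt_add_iff_right]
      ring
    · rw [incD, if_neg h9, costD, if_neg h9]
      simp only [List.map_cons, List.zip_cons_cons, List.sum_cons, List.length_cons]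
      rw [if_neg (by omega), sum_zip_self]
      have hne : Nat.digitChar (d+1) ≠ Nat.digitChar d := dc_ne (by omega) hd (by omega)
      rw [if_pos hne, wA_digitChar (d+1) (by omega)]
      ring

lemma checkA_incD (L : List Nat) (h : ∀ e ∈ L, e < 10) :
    checkA ((incD L).map Nat.digitChar) (L.map Nat.digitChar) = costD L := by
  rw [checkA_zip _ _ (by simpa using length_le_incD L)]
  have := aux_cost L h
  simpa using this

lemma main_invariant (n : Nat) :
    ((PySem.List.pyRange 0 (n : Int) 1).foldl slowlyStepA ((0:Int),(0:Int))).1 = (n : Int) ∧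
    ((PySem.List.pyRange 0 (n : Int) 1).foldl
      (fun st (_ : Int) => let p := incB st.1; (p.2, st.2 + p.1)) ([(0:Int)],(0:Int))).1
      = (padD n).map (Int.ofNat) ∧
    ((PySem.List.pyRange 0 (n : Int) 1).foldl slowlyStepA ((0:Int),(0:Int))).2 =
    ((PySem.List.pyRange 0 (n : Int) 1).foldl
      (fun st (_ : Int) => let p := incB st.1; (p.2, st.2 + p.1)) ([(0:Int)],(0:Int))).2 := by
  induction n with
  | zero =>
    rw [PySem.List.pyRange_one_eq_nil (by omega)]
    refine ⟨rfl, ?_, rfl⟩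
    simp [padD]
  | succ n ih =>
    obtain ⟨ihA, ihB, ihans⟩ := ih
    rw [show (((n+1 : Nat)) : Int) = (n : Int) + 1 by push_cast; ring,
      PySem.List.pyRange_one_succ_right (by omega)]
    simp only [List.foldl_append, List.foldl_cons, List.foldl_nil]
    set IA := (PySem.List.pyRange 0 (n : Int) 1).foldl slowlyStepA ((0:Int),(0:Int)) with hIA
    set IB := (PySem.List.pyRange 0 (n : Int) 1).foldl
      (fun st (_ : Int) => let p := incB st.1; (p.2, st.2 + p.1)) ([(0:Int)],(0:Int)) with hIB
    have hcur : IA.1 + 1 = (((n+1 : Nat)) : Int) := by rw [ihA]; push_cast; ring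
    have hchars : ∀ m : Nat,
        (PySem.List.slice? (PySem.Int.toChars (m : Int)) none none (-1)).getD []
          = (padD m).map Nat.digitChar := by
      intro m
      rw [PySem.List.slice?_none_none_neg_one, Option.getD_some, toChars_natCast,
        List.reverse_reverse]
    have hstepA : slowlyStepA IA ((n : Int)) = (IA.1 + 1, IA.2 + costD (padD n)) := by
      have e1 : (((n+1 : Nat)) : Int) - 1 = ((n : Nat) : Int) := by push_cast; ring
      simp only [slowlyStepA, hcur, e1, hchars]
      rw [← incD_padD, checkA_incD (padD n) (padD_lt n)]
    have hstepB : incB IB.1 = (costD (padD n), (incD (padD n)).map (Int.ofNat)) := by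
      rw [ihB]; exact incB_eq (padD n) (padD_lt n)
    refine ⟨by rw [hstepA]; simp [ihA], ?_, ?_⟩
    · show (incB IB.1).2 = _
      rw [hstepB, incD_padD]
    · show (slowlyStepA IA ((n : Int))).2 = IB.2 + (incB IB.1).1
      rw [hstepA, hstepB, ihans]

-- ===== VERDICT (by name: the statement is the Claim_ definition above) =====
theorem slowly_spec : Claim_equal_slowly := by
  intro k _
  unfold Spec_slowly slowly slowly_alt
  rcases (show k ≤ 0 ∨ 0 < k by omega) with hk | hk
  · rw [PySem.List.pyRange_one_eq_nil (by omega)]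
    rfl
  · have hk' : k = (k.toNat : Int) := by omega
    rw [hk']
    exact (main_invariant k.toNat).2.2
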